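-- pv_equiv track=rewrite | github.com/shyamolkonwar/studysense | backend/app/agents/agent_coordinator.py | _analyze_context_needs
-- ===== SOURCE A (Python) =====
-- from typing import List, Dict, Any, Optional
--
-- def _analyze_context_needs(message: str) -> List[str]:
--     """Analyze message to determine what context/tools are needed"""
--     needs = []
--     message_lower = message.lower()
--
--     # Check for academic stress indicators
--     if any(word in message_lower for word in ["exam", "test", "deadline", "assignment", "study", "grade"]):
--         needs.extend(["academic_schedule", "lms_deadlines"])
--
--     # Check for emotional distress
--     if any(word in message_lower for word in ["stress", "anxiety", "worried", "overwhelmed", "depressed"]):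
--         needs.extend(["emotional_support", "crisis_resources"])
--
--     # Check for sleep/study patterns
--     if any(word in message_lower for word in ["sleep", "tired", "can't sleep", "insomnia"]):
--         needs.extend(["sleep_patterns", "study_habits"])
--
--     # Check for social context
--     if any(word in message_lower for word in ["friend", "social", "lonely", "support"]):
--         needs.extend(["social_context", "peer_support"])
--
--     return list(set(needs))  # Remove duplicates
-- ===== SOURCE B (Python) =====
-- from typing import List, Dict, Any, Optional
--
-- # Inverted mapping: each individual keyword -> the context tags it triggers.
-- _KEYWORD_TAGS = {
--     "exam": ["academic_schedule", "lms_deadlines"],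
--     "test": ["academic_schedule", "lms_deadlines"],
--     "deadline": ["academic_schedule", "lms_deadlines"],
--     "assignment": ["academic_schedule", "lms_deadlines"],
--     "study": ["academic_schedule", "lms_deadlines"],
--     "grade": ["academic_schedule", "lms_deadlines"],
--     "stress": ["emotional_support", "crisis_resources"],
--     "anxiety": ["emotional_support", "crisis_resources"],
--     "worried": ["emotional_support", "crisis_resources"],
--     "overwhelmed": ["emotional_support", "crisis_resources"],
--     "depressed": ["emotional_support", "crisis_resources"],
--     "sleep": ["sleep_patterns", "study_habits"],
--     "tired": ["sleep_patterns", "study_habits"],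
--     "can't sleep": ["sleep_patterns", "study_habits"],
--     "insomnia": ["sleep_patterns", "study_habits"],
--     "friend": ["social_context", "peer_support"],
--     "social": ["social_context", "peer_support"],
--     "lonely": ["social_context", "peer_support"],
--     "support": ["social_context", "peer_support"],
-- }
--
-- def _analyze_context_needs(message: str) -> List[str]:
--     """Analyze message to determine what context/tools are needed"""
--     message_lower = message.lower()
--     needs = []
--     for keyword, tags in _KEYWORD_TAGS.items():
--         if keyword in message_lower:
--             needs.extend(tags)
--     return list(set(needs))  # Remove duplicates
-- ===== Notes on version B (the rewrite author's own statement) =====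
-- stated objective: alternative
-- what changed: Replaces the four hard-coded if/any() group checks with a single data-driven pass over an inverted keyword-to-tags mapping that extends one running list per matching keyword, then deduplicates with list(set(...)) as before.
import Mathlib
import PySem

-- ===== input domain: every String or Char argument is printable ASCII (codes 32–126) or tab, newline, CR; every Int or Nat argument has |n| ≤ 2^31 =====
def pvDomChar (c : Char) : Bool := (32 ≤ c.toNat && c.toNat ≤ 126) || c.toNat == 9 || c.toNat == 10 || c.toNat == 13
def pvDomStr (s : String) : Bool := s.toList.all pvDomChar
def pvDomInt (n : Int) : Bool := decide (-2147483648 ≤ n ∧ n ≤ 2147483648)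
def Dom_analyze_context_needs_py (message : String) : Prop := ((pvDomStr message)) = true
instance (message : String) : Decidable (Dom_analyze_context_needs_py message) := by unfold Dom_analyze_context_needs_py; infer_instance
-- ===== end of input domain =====

-- B replaces A's four hard-coded if/any() group checks with a single data-driven
-- pass over an inverted keyword→tags mapping (objective: alternative decomposition).
-- ===== PORT A =====
def analyze_context_needs_py (message : String) : List String :=
  let message_lower := PySem.Str.lower message
  let needs : List String := []
  let needs := if (["exam", "test", "deadline", "assignment", "study", "grade"].any
      (fun word => PySem.Str.isIn word message_lower)) then
    needs ++ ["academic_schedule", "lms_deadlines"] else needs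
  let needs := if (["stress", "anxiety", "worried", "overwhelmed", "depressed"].any
      (fun word => PySem.Str.isIn word message_lower)) then
    needs ++ ["emotional_support", "crisis_resources"] else needs
  let needs := if (["sleep", "tired", "can't sleep", "insomnia"].any
      (fun word => PySem.Str.isIn word message_lower)) then
    needs ++ ["sleep_patterns", "study_habits"] else needs
  let needs := if (["friend", "social", "lonely", "support"].any
      (fun word => PySem.Str.isIn word message_lower)) then
    needs ++ ["social_context", "peer_support"] else needs
  PySem.Set.ofList needs  -- list(set(needs))

-- ===== PORT B =====
def keywordTags : List (String × List String) :=
  [("exam", ["academic_schedule", "lms_deadlines"]),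
   ("test", ["academic_schedule", "lms_deadlines"]),
   ("deadline", ["academic_schedule", "lms_deadlines"]),
   ("assignment", ["academic_schedule", "lms_deadlines"]),
   ("study", ["academic_schedule", "lms_deadlines"]),
   ("grade", ["academic_schedule", "lms_deadlines"]),
   ("stress", ["emotional_support", "crisis_resources"]),
   ("anxiety", ["emotional_support", "crisis_resources"]),
   ("worried", ["emotional_support", "crisis_resources"]),
   ("overwhelmed", ["emotional_support", "crisis_resources"]),
   ("depressed", ["emotional_support", "crisis_resources"]),
   ("sleep", ["sleep_patterns", "study_habits"]),
   ("tired", ["sleep_patterns", "study_habits"]),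
   ("can't sleep", ["sleep_patterns", "study_habits"]),
   ("insomnia", ["sleep_patterns", "study_habits"]),
   ("friend", ["social_context", "peer_support"]),
   ("social", ["social_context", "peer_support"]),
   ("lonely", ["social_context", "peer_support"]),
   ("support", ["social_context", "peer_support"])]

def analyze_context_needs_py_alt (message : String) : List String :=
  let message_lower := PySem.Str.lower message
  let needs := keywordTags.foldl
    (fun acc kt => if PySem.Str.isIn kt.1 message_lower then acc ++ kt.2 else acc) []
  PySem.Set.ofList needs  -- list(set(needs))

-- ===== PRECONDITION & SPEC =====
def Spec_analyze_context_needs_py (message : String) (out : List String) : Prop := out = analyze_context_needs_py_alt message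
instance (message : String) (out : List String) : Decidable (Spec_analyze_context_needs_py message out) := by unfold Spec_analyze_context_needs_py; infer_instance

-- ===== CLAIM (what is proved, stated in full; the proofs are below) =====
def Claim_equal_analyze_context_needs_py : Prop := ∀ (message : String), Dom_analyze_context_needs_py message → Spec_analyze_context_needs_py message (analyze_context_needs_py message)

-- ===== LEMMAS AND PROOFS =====

-- adding elements already present leaves a Set unchanged
theorem set_update_of_subset (s : PySem.Set String) (xs : List String)
    (h : ∀ x ∈ xs, x ∈ s) : PySem.Set.update s xs = s := by
  induction xs generalizing s with
  | nil => rfl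
  | cons x xs ih =>
    have hx : PySem.Set.add s x = s := by
      simp [PySem.Set.add, PySem.Set.contains, h x (List.mem_cons_self ..)]
    show PySem.Set.update (PySem.Set.add s x) xs = s
    rw [hx]
    exact ih s (fun y hy => h y (List.mem_cons_of_mem _ hy))

theorem mem_set_add_self (s : PySem.Set String) (x : String) : x ∈ PySem.Set.add s x := by
  simp [PySem.Set.add, PySem.Set.contains]; split <;> simp_all

theorem mem_set_add_of_mem (s : PySem.Set String) (x y : String) (h : y ∈ s) :
    y ∈ PySem.Set.add s x := by
  simp [PySem.Set.add]; split <;> simp [h]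

theorem mem_set_update_left (s : PySem.Set String) (xs : List String) (y : String)
    (h : y ∈ s) : y ∈ PySem.Set.update s xs := by
  induction xs generalizing s with
  | nil => exact h
  | cons x xs ih => exact ih _ (mem_set_add_of_mem s x y h)

-- every element of xs ends up in update s xs
theorem mem_set_update_right (s : PySem.Set String) (xs : List String) :
    ∀ x ∈ xs, x ∈ PySem.Set.update s xs := by
  induction xs generalizing s with
  | nil => intro x hx; cases hx
  | cons x xs ih =>
    intro y hy
    rcases List.mem_cons.mp hy with rfl | hy
    · exact mem_set_update_left _ xs y (mem_set_add_self s y)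
    · exact ih _ y hy

theorem set_update_append (s : PySem.Set String) (xs ys : List String) :
    PySem.Set.update s (xs ++ ys) = PySem.Set.update (PySem.Set.update s xs) ys := by
  simp [PySem.Set.update]

theorem set_update_update_self (s : PySem.Set String) (xs : List String) :
    PySem.Set.update (PySem.Set.update s xs) xs = PySem.Set.update s xs :=
  set_update_of_subset _ _ (mem_set_update_right s xs)

-- per-keyword accumulation of one group folds, as a set, to the group's any() check
theorem group_update (ml : String) (ws tags : List String) (s : PySem.Set String) :
    PySem.Set.update s (ws.flatMap (fun w => if PySem.Str.isIn w ml then tags else [])) =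
    PySem.Set.update s (if ws.any (fun w => PySem.Str.isIn w ml) then tags else []) := by
  induction ws generalizing s with
  | nil => rfl
  | cons w ws ih =>
    by_cases h : PySem.Str.isIn w ml = true
    · rw [List.flatMap_cons, if_pos h,
        if_pos (show ((w :: ws).any fun w => PySem.Str.isIn w ml) = true by
          rw [List.any_cons, h]; rfl),
        set_update_append, ih]
      by_cases hany : (ws.any fun w => PySem.Str.isIn w ml) = true
      · rw [if_pos hany]
        exact set_update_update_self s tags
      · rw [if_neg hany]
        rfl
    · rw [List.flatMap_cons, if_neg h, List.nil_append, ih s,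
        show ((w :: ws).any fun w => PySem.Str.isIn w ml)
            = (ws.any fun w => PySem.Str.isIn w ml) by
          rw [List.any_cons, Bool.not_eq_true _ |>.mp h]; rfl]

-- 'needs = needs ++ t if c' pushed into a trailing if-block
theorem ite_append (c : Bool) (a b : List String) :
    (if c = true then a ++ b else a) = a ++ (if c = true then b else []) := by
  cases c <;> simp

theorem ofList_eq_update_empty (xs : List String) :
    PySem.Set.ofList xs = PySem.Set.update PySem.Set.empty xs := rfl

-- ===== VERDICT (by name: the statement is the Claim_ definition above) =====
theorem analyze_context_needs_py_spec : Claim_equal_analyze_context_needs_py := by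
  intro message _
  unfold Spec_analyze_context_needs_py analyze_context_needs_py analyze_context_needs_py_alt
  set ml := PySem.Str.lower message with hml
  simp only [ite_append]
  rw [PySem.List.foldl_append_eq_flatMap]
  have hsplit : keywordTags.flatMap
      (fun kt => if PySem.Str.isIn kt.1 ml then kt.2 else []) =
      (["exam", "test", "deadline", "assignment", "study", "grade"].flatMap
        (fun w => if PySem.Str.isIn w ml then ["academic_schedule", "lms_deadlines"] else []))
      ++ (["stress", "anxiety", "worried", "overwhelmed", "depressed"].flatMap
        (fun w => if PySem.Str.isIn w ml then ["emotional_support", "crisis_resources"] else []))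
      ++ (["sleep", "tired", "can't sleep", "insomnia"].flatMap
        (fun w => if PySem.Str.isIn w ml then ["sleep_patterns", "study_habits"] else []))
      ++ (["friend", "social", "lonely", "support"].flatMap
        (fun w => if PySem.Str.isIn w ml then ["social_context", "peer_support"] else [])) := by
    simp [keywordTags, List.flatMap]
    rfl
  rw [hsplit]
  simp only [List.nil_append, List.append_assoc,
    ofList_eq_update_empty, set_update_append, group_update]
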